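-- pv_equiv track=rewrite | github.com/wrmsr/omlish | omextra/formats/goyaml/scanning.py | new_line_count
-- ===== SOURCE A (Python) =====
-- def new_line_count(src: str) -> int:
--     size = len(src)
--     cnt = 0
--     i = -1
--     while True:
--         i += 1
--         if not (i < size):
--             break
--         c = src[i]
--         if c == '\r':
--             if i + 1 < size and src[i + 1] == '\n':
--                 i += 1
--             cnt += 1
--         elif c == '\n':
--             cnt += 1
--     return cnt
-- ===== SOURCE B (Python) =====
-- def new_line_count(src: str) -> int:
--     # inclusion-exclusion over three substring counts: each '\n' and '\r'
--     # is a break, but a '\r\n' pair was counted twice, so subtract those.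
--     return src.count('\n') + src.count('\r') - src.count('\r\n')
-- ===== Notes on version B (the rewrite author's own statement) =====
-- stated objective: faster
-- what changed: Replaces the stateful per-character index walk with CRLF lookahead by three C-level substring counts combined by inclusion-exclusion: count of LF plus count of CR minus count of CRLF.
import Mathlib
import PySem

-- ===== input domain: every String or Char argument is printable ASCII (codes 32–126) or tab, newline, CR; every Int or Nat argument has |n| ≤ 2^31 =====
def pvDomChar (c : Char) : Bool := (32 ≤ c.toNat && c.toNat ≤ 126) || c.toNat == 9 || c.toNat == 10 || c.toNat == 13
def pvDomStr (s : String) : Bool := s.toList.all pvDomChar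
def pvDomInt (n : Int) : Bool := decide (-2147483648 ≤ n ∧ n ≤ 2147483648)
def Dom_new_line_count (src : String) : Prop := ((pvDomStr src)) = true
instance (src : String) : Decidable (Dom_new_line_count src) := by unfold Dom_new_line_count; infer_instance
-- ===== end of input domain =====

-- B replaces A's stateful index walk (with CRLF lookahead) by three substring
-- counts combined by inclusion-exclusion; same result, more idiomatic.

-- ===== PORT A =====
-- A's while loop walks the string left to right; src[i] is always in range
-- (guarded by i < size), so the walk is exactly a traversal of the character
-- list, the CRLF branch consuming one extra character.
def newLineCountLoop : List Char → Int → Int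
  | [], cnt => cnt
  | '\r' :: '\n' :: rest, cnt => newLineCountLoop rest (cnt + 1)
  | '\r' :: rest, cnt => newLineCountLoop rest (cnt + 1)
  | '\n' :: rest, cnt => newLineCountLoop rest (cnt + 1)
  | _ :: rest, cnt => newLineCountLoop rest cnt

def new_line_count (src : String) : Int :=
  newLineCountLoop src.toList 0

-- ===== PORT B =====
def new_line_count_alt (src : String) : Int :=
  (PySem.Str.count src "\n" : Int) + (PySem.Str.count src "\r" : Int)
    - (PySem.Str.count src "\r\n" : Int)

-- ===== PRECONDITION & SPEC =====
def Spec_new_line_count (src : String) (out : Int) : Prop := out = new_line_count_alt src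
instance (src : String) (out : Int) : Decidable (Spec_new_line_count src out) := by unfold Spec_new_line_count; infer_instance

-- ===== CLAIM (what is proved, stated in full; the proofs are below) =====
def Claim_equal_new_line_count : Prop := ∀ (src : String), Dom_new_line_count src → Spec_new_line_count src (new_line_count src)

-- ===== LEMMAS AND PROOFS =====

-- non-overlapping occurrence count of a (nonempty) pattern, structurally recursive
def occAux (sub : List Char) : List Char → Nat
  | [] => 0
  | h :: t =>
    if sub.isPrefixOf (h :: t) then 1 + occAux sub (t.drop (sub.length - 1))
    else occAux sub t
termination_by l => l.length
decreasing_by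
  all_goals simp only [List.length_drop, List.length_cons]
  all_goals omega

theorem occAux_eq_go (sub : List Char) (hsub : sub ≠ []) :
    ∀ (fuel : Nat) (l : List Char) (acc : Nat), l.length ≤ fuel →
      PySem.Chars.count.go sub fuel l acc = acc + occAux sub l := by
  intro fuel
  induction fuel with
  | zero =>
    intro l acc h
    have : l = [] := List.eq_nil_of_length_eq_zero (Nat.le_zero.mp h)
    subst this
    simp [PySem.Chars.count.go, occAux]
  | succ n ih =>
    intro l acc h
    match l with
    | [] => simp [PySem.Chars.count.go, occAux]
    | c :: t =>
      rw [PySem.Chars.count.go]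
      by_cases hp : sub.isPrefixOf (c :: t)
      · simp only [hp, if_true]
        have hdrop : (c :: t).drop sub.length = t.drop (sub.length - 1) := by
          cases sub with
          | nil => exact absurd rfl hsub
          | cons s₀ srest =>
            simp only [List.length_cons, Nat.add_sub_cancel, List.drop_succ_cons]
        rw [hdrop]
        have hlen : (t.drop (sub.length - 1)).length ≤ n := by
          have := List.length_drop (l := t) (i := sub.length - 1)
          simp at h ⊢
          omega
        rw [ih _ _ hlen]
        rw [occAux]
        simp [hp]
        omega
      · simp only [hp]
        have hlen : t.length ≤ n := by simp at h; omega
        rw [ih _ _ hlen]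
        rw [occAux]
        simp [hp]

theorem count_eq_occAux (s sub : List Char) (hsub : sub ≠ []) :
    PySem.Chars.count s sub = occAux sub s := by
  rw [PySem.Chars.count]
  simp [List.isEmpty_iff, hsub]
  simpa using occAux_eq_go sub hsub s.length s 0 (le_refl _)

theorem loop_eq (l : List Char) (cnt : Int) :
    newLineCountLoop l cnt =
      cnt + (occAux ['\n'] l : Int) + (occAux ['\r'] l : Int)
        - (occAux ['\r', '\n'] l : Int) := by
  induction l, cnt using newLineCountLoop.induct with
  | case1 cnt =>
    simp [newLineCountLoop, occAux]
  | case2 rest cnt ih =>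
    rw [newLineCountLoop, ih]
    simp [occAux, List.isPrefixOf]
    ring
  | case3 rest cnt hne ih =>
    have hpre : ¬ (['\n'] : List Char).isPrefixOf rest = true := by
      cases rest with
      | nil => simp
      | cons h t =>
        by_cases hh : h = '\n'
        · subst hh
          exact (hne t rfl).elim
        · simp [List.isPrefixOf]
          exact fun h' => hh h'.symm
    rw [newLineCountLoop.eq_3 _ _ hne, ih]
    simp [occAux, List.isPrefixOf, hpre]
    ring
  | case4 rest cnt ih =>
    rw [newLineCountLoop, ih]
    simp [occAux, List.isPrefixOf]
    ring
  | case5 c rest cnt h1 h2 h3 ih =>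
    have h2' : ¬ ('\r' = c) := fun h => h2 h.symm
    have h3' : ¬ ('\n' = c) := fun h => h3 h.symm
    rw [newLineCountLoop.eq_5 _ _ _ h1 h2 h3, ih]
    have e1 : occAux ['\n'] (c :: rest) = occAux ['\n'] rest := by
      rw [occAux]
      simp [List.isPrefixOf, h3']
    have e2 : occAux ['\r'] (c :: rest) = occAux ['\r'] rest := by
      rw [occAux]
      simp [List.isPrefixOf, h2']
    have e3 : occAux ['\r', '\n'] (c :: rest) = occAux ['\r', '\n'] rest := by
      rw [occAux]
      simp [List.isPrefixOf, h2']
    rw [e1, e2, e3]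

-- ===== VERDICT (by name: the statement is the Claim_ definition above) =====
theorem new_line_count_spec : Claim_equal_new_line_count := by
  intro src _
  unfold Spec_new_line_count new_line_count new_line_count_alt
  simp only [PySem.Str.count_eq]
  rw [count_eq_occAux _ _ (by simp), count_eq_occAux _ _ (by simp),
      count_eq_occAux _ _ (by simp), loop_eq]
  have h1 : ("\n" : String).toList = ['\n'] := rfl
  have h2 : ("\r" : String).toList = ['\r'] := rfl
  have h3 : ("\r\n" : String).toList = ['\r', '\n'] := rfl
  rw [h1, h2, h3]
  ring
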